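-- pv_equiv track=rewrite | github.com/matanmalka1/binder-billing-crm | scripts/json_examples.py | _first_success_status
-- ===== SOURCE A (Python) =====
-- from typing import Any
--
-- def _first_success_status(responses: dict[str, Any]) -> str | None:
--     def sort_key(code: str) -> tuple[int, int]:
--         if code.isdigit():
--             return (0, int(code))
--         return (1, 999)
--
--     for status in sorted(responses.keys(), key=sort_key):
--         if status.startswith("2"):
--             return status
--     return None
-- ===== SOURCE B (Python) =====
-- from typing import Any
--
-- def _first_success_status(responses: dict[str, Any]) -> str | None:
--     best_digit = None
--     best_val = 0
--     first_nondigit = None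
--     for status in responses:
--         if not status.startswith("2"):
--             continue
--         if status.isdigit():
--             v = int(status)
--             if best_digit is None or v < best_val:
--                 best_digit = status
--                 best_val = v
--         elif first_nondigit is None:
--             first_nondigit = status
--     return best_digit if best_digit is not None else first_nondigit
-- ===== Notes on version B (the rewrite author's own statement) =====
-- stated objective: alternative
-- what changed: Replaces sort-then-scan (sorted(keys, key=...) followed by a search for the first '2'-prefixed key) with a single pass over the dict keys that tracks the minimal-int digit match and the first non-digit match.
import Mathlib
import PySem

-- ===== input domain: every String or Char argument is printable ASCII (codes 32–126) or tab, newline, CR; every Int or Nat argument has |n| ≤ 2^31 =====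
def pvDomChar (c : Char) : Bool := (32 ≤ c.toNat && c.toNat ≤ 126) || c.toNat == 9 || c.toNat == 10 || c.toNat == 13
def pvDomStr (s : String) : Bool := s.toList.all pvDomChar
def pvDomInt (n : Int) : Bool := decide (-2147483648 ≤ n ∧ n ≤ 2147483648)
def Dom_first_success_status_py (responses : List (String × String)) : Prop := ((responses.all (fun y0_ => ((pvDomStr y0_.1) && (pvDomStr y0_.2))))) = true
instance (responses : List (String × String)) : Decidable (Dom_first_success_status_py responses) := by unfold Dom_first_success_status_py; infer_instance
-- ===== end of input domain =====

-- B replaces A's sort-then-scan over the keys by a single pass keeping two running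
-- candidates (minimal-int digit match, first non-digit match); return value only.

-- ===== PORT A =====
-- sort_key(code) = (0, int(code)) if code.isdigit() else (1, 999): the tuple key, as sorted2's two components
def pvSortKey1 (code : String) : Int := if PySem.Str.strIsdigit code then 0 else 1
def pvSortKey2 (code : String) : Int := if PySem.Str.strIsdigit code then (PySem.Int.ofStr? code).getD 0 else 999
  -- int(code): code.isdigit() guarantees ofStr? = some, so getD 0 is never the default on the branch A uses it

def first_success_status_py (responses : List (String × String)) : Option String :=
  -- for status in sorted(responses.keys(), key=sort_key): if status.startswith("2"): return status
  (PySem.List.sorted2 ((PySem.Dict.ofList responses).keys) pvSortKey1 pvSortKey2).find?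
    (fun status => PySem.Str.startswith status "2")

-- ===== PORT B =====
-- loop body of Source B; state = (best_digit, best_val, first_nondigit)
def pvStepB (st : Option String × Int × Option String) (status : String) : Option String × Int × Option String :=
  if !PySem.Str.startswith status "2" then st
  else if PySem.Str.strIsdigit status then
    let v := (PySem.Int.ofStr? status).getD 0
    match st with
    | (none, _, fn) => (some status, v, fn)
    | (some b, bv, fn) => if v < bv then (some status, v, fn) else (some b, bv, fn)
  else
    match st with
    | (bd, bv, none) => (bd, bv, some status)
    | st' => st'

def first_success_status_py_alt (responses : List (String × String)) : Option String :=
  match ((PySem.Dict.ofList responses).keys).foldl pvStepB (none, 0, none) with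
  | (some b, _, _) => some b
  | (none, _, fn) => fn

-- ===== PRECONDITION & SPEC =====
def Spec_first_success_status_py (responses : List (String × String)) (out : Option String) : Prop := out = first_success_status_py_alt responses
instance (responses : List (String × String)) (out : Option String) : Decidable (Spec_first_success_status_py responses out) := by unfold Spec_first_success_status_py; infer_instance

-- ===== CLAIM (what is proved, stated in full; the proofs are below) =====
def Claim_equal_first_success_status_py : Prop := ∀ (responses : List (String × String)), Dom_first_success_status_py responses → Spec_first_success_status_py responses (first_success_status_py responses)

-- ===== LEMMAS AND PROOFS =====

-- proof-side abbreviations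
def pvP (s : String) : Bool := PySem.Str.startswith s "2"
def pvDig (s : String) : Bool := PySem.Str.strIsdigit s
def pvF (s : String) : Int := (PySem.Int.ofStr? s).getD 0
def pvDP (s : String) : Bool := pvDig s && pvP s
def pvNP (s : String) : Bool := !pvDig s && pvP s
def pvMid (ks : List String) : Option String :=
  (PySem.List.min? (ks.filter pvDP) pvF).or ((ks.filter pvNP).head?)

-- the Bool comparator sorted2 uses, and the matching ≤ relation
def pvLt (a b : String) : Bool :=
  decide (pvSortKey1 a < pvSortKey1 b) || (!decide (pvSortKey1 b < pvSortKey1 a) && decide (pvSortKey2 a < pvSortKey2 b))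
def pvLE (a b : String) : Prop :=
  pvSortKey1 a < pvSortKey1 b ∨ (pvSortKey1 a = pvSortKey1 b ∧ pvSortKey2 a ≤ pvSortKey2 b)

lemma pvLt_false_iff (a b : String) : pvLt a b = false ↔ pvLE b a := by
  simp [pvLt, pvLE]; omega

lemma pvLE_trans {a b c : String} (h1 : pvLE a b) (h2 : pvLE b c) : pvLE a c := by
  unfold pvLE at *; omega

lemma pvLE_total (a b : String) : pvLE a b ∨ pvLE b a := by
  unfold pvLE; omega

lemma min?_append_singleton (l : List String) (x : String) (f : String → Int) :
    PySem.List.min? (l ++ [x]) f =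
      match PySem.List.min? l f with
      | none => some x
      | some m => if f x < f m then some x else some m := by
  cases hacc : PySem.List.min? l f with
  | none =>
    unfold PySem.List.min? at hacc ⊢
    rw [List.foldl_append, List.foldl_cons, List.foldl_nil, hacc]
  | some m =>
    unfold PySem.List.min? at hacc ⊢
    rw [List.foldl_append, List.foldl_cons, List.foldl_nil, hacc]

lemma sorted2_append_singleton (ks : List String) (x : String) :
    PySem.List.sorted2 (ks ++ [x]) pvSortKey1 pvSortKey2 =
      PySem.List.insertBy pvLt x (PySem.List.sorted2 ks pvSortKey1 pvSortKey2) := by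
  unfold PySem.List.sorted2 pvLt
  rw [List.foldl_append]
  rfl

lemma insertBy_eq_take_drop (x : String) (L : List String) :
    PySem.List.insertBy pvLt x L =
      L.takeWhile (fun y => !pvLt x y) ++ x :: L.dropWhile (fun y => !pvLt x y) := by
  induction L with
  | nil => simp [PySem.List.insertBy]
  | cons y t ih =>
    by_cases h : pvLt x y
    · simp [PySem.List.insertBy, List.takeWhile_cons, List.dropWhile_cons, h]
    · simp [PySem.List.insertBy, List.takeWhile_cons, List.dropWhile_cons, h, ih]

lemma drop_not_le (x : String) (L : List String) (h : L.Pairwise pvLE) :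
    ∀ z ∈ L.dropWhile (fun y => !pvLt x y), ¬ pvLE z x := by
  induction L with
  | nil => simp
  | cons y t ih =>
    rcases List.pairwise_cons.mp h with ⟨hy, ht⟩
    by_cases hxy : pvLt x y
    · intro z hz
      rw [List.dropWhile_cons] at hz
      simp [hxy] at hz
      have hnyx : ¬ pvLE y x := by
        intro hle
        have := (pvLt_false_iff x y).mpr hle
        simp [this] at hxy
      rcases hz with rfl | hz
      · exact hnyx
      · exact fun hzx => hnyx (pvLE_trans (hy z hz) hzx)
    · intro z hz
      rw [List.dropWhile_cons] at hz
      simp [hxy] at hz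
      exact ih ht z hz

lemma pairwise_insertBy (x : String) (L : List String) (h : L.Pairwise pvLE) :
    (PySem.List.insertBy pvLt x L).Pairwise pvLE := by
  rw [insertBy_eq_take_drop]
  have hsplit : L = L.takeWhile (fun y => !pvLt x y) ++ L.dropWhile (fun y => !pvLt x y) :=
    (List.takeWhile_append_dropWhile).symm
  have hTD : (L.takeWhile (fun y => !pvLt x y) ++ L.dropWhile (fun y => !pvLt x y)).Pairwise pvLE := by
    rw [← hsplit]; exact h
  rcases List.pairwise_append.mp hTD with ⟨hT, hD, hcross⟩
  apply List.pairwise_append.mpr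
  refine ⟨hT, ?_, ?_⟩
  · apply List.pairwise_cons.mpr
    refine ⟨?_, hD⟩
    intro z hz
    rcases pvLE_total x z with h1 | h1
    · exact h1
    · exact absurd h1 (drop_not_le x L h z hz)
  · intro y hy z hz
    rcases List.mem_cons.mp hz with h | hz'
    · rw [h]
      have := List.mem_takeWhile_imp hy
      simp at this
      exact (pvLt_false_iff x y).mp this
    · exact hcross y hy z hz'

lemma find?_of_mem_left {p : String → Bool} {T D : List String} {m : String}
    (h : (T ++ D).find? p = some m) (hm : m ∈ T) : T.find? p = some m := by
  rw [List.find?_append] at h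
  cases hT : T.find? p with
  | some z => rw [hT] at h; simpa using h
  | none =>
    exfalso
    have hpm : p m = true := by
      rw [hT] at h; simp at h
      exact List.find?_some h
    exact (List.find?_eq_none.mp hT m hm) hpm

-- key facts about the key components
lemma key1_dig {s : String} (h : pvDig s = true) : pvSortKey1 s = 0 := by
  simp [pvSortKey1, pvDig] at *; simp [h]
lemma key1_nondig {s : String} (h : pvDig s = false) : pvSortKey1 s = 1 := by
  simp [pvSortKey1, pvDig] at *; simp [h]
lemma key2_dig {s : String} (h : pvDig s = true) : pvSortKey2 s = pvF s := by
  simp [pvSortKey2, pvDig, pvF] at *; simp [h]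
lemma key2_nondig {s : String} (h : pvDig s = false) : pvSortKey2 s = 999 := by
  simp [pvSortKey2, pvDig] at *; simp [h]

-- ===== A-side characterization =====
lemma a_loop (ks : List String) :
    (PySem.List.sorted2 ks pvSortKey1 pvSortKey2).find? pvP = pvMid ks ∧
    (PySem.List.sorted2 ks pvSortKey1 pvSortKey2).Pairwise pvLE := by
  induction ks using List.reverseRecOn with
  | nil => constructor <;> simp [PySem.List.sorted2, pvMid, PySem.List.min?]
  | append_singleton ks x ih =>
    rcases ih with ⟨ihf, ihp⟩
    set L := PySem.List.sorted2 ks pvSortKey1 pvSortKey2 with hL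
    have hperm : L.Perm ks := PySem.List.sorted2_perm ks pvSortKey1 pvSortKey2 false
    refine ⟨?_, ?_⟩
    swap
    · rw [sorted2_append_singleton]; exact pairwise_insertBy x L ihp
    rw [sorted2_append_singleton, insertBy_eq_take_drop, ← hL]
    set T := L.takeWhile (fun y => !pvLt x y) with hT
    set Dr := L.dropWhile (fun y => !pvLt x y) with hDr
    have hTD : T ++ Dr = L := List.takeWhile_append_dropWhile
    -- membership of T-elements in ks
    have hTks : ∀ y ∈ T, y ∈ ks := by
      intro y hy
      exact hperm.mem_iff.mp (by rw [← hTD]; exact List.mem_append_left _ hy)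
    -- T-elements satisfy pvLE · x
    have hTle : ∀ y ∈ T, pvLE y x := by
      intro y hy
      have := List.mem_takeWhile_imp hy
      simp at this
      exact (pvLt_false_iff x y).mp this
    have hfind : (T ++ x :: Dr).find? pvP = (T.find? pvP).or (if pvP x then some x else Dr.find? pvP) := by
      rw [List.find?_append]; congr 1; rw [List.find?_cons]; split <;> simp_all
    rw [hfind]
    by_cases hp : pvP x = true
    swap
    · -- x is not a match: both sides unchanged
      have hpx : pvP x = false := by simpa using hp
      have : (T.find? pvP).or (Dr.find? pvP) = pvMid ks := by
        rw [← List.find?_append, hTD, ihf]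
      simp [hpx, this, pvMid, List.filter_append, pvDP, pvNP, hpx]
    by_cases hd : pvDig x = true
    · -- digit match
      have hmid : pvMid (ks ++ [x]) =
          (match PySem.List.min? (ks.filter pvDP) pvF with
           | none => some x
           | some m => if pvF x < pvF m then some x else some m).or ((ks.filter pvNP).head?) := by
        simp [pvMid, List.filter_append, pvDP, pvNP, hd, hp, min?_append_singleton]
      rw [hmid]
      -- non-digit elements are never pvLE x when x is a digit
      have hnd : ∀ y, pvP y = true → pvLE y x → pvDig y = true ∧ pvF y ≤ pvF x := by
        intro y hpy hle
        by_cases hdy : pvDig y = true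
        · refine ⟨hdy, ?_⟩
          rcases hle with h1 | ⟨h1, h2⟩
          · rw [key1_dig hdy, key1_dig hd] at h1; omega
          · rwa [key2_dig hdy, key2_dig hd] at h2
        · exfalso
          have hdy' : pvDig y = false := by simpa using hdy
          rcases hle with h1 | ⟨h1, _⟩ <;> rw [key1_nondig hdy', key1_dig hd] at h1 <;> omega
      cases hmin : PySem.List.min? (ks.filter pvDP) pvF with
      | none =>
        have hDnil : ks.filter pvDP = [] := (PySem.List.min?_eq_none_iff _ _).mp hmin
        have hTnone : T.find? pvP = none := by
          apply List.find?_eq_none.mpr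
          intro y hy hpy
          rcases hnd y hpy (hTle y hy) with ⟨hdy, _⟩
          have : y ∈ ks.filter pvDP := List.mem_filter.mpr ⟨hTks y hy, by simp [pvDP, hdy, hpy]⟩
          rw [hDnil] at this; simp at this
        simp [hTnone, hp]
      | some m =>
        have hmem : m ∈ ks.filter pvDP := PySem.List.min?_mem hmin
        have hmf : ∀ y ∈ ks.filter pvDP, pvF m ≤ pvF y := fun y hy => PySem.List.min?_isMin hmin y hy
        rcases List.mem_filter.mp hmem with ⟨hmk, hmdp⟩
        have hmd : pvDig m = true := by simp [pvDP] at hmdp; exact hmdp.1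
        have hmp : pvP m = true := by simp [pvDP] at hmdp; exact hmdp.2
        by_cases hlt : pvF x < pvF m
        · -- new strict minimum: nothing in T matches
          have hTnone : T.find? pvP = none := by
            apply List.find?_eq_none.mpr
            intro y hy hpy
            rcases hnd y hpy (hTle y hy) with ⟨hdy, hfy⟩
            have : y ∈ ks.filter pvDP := List.mem_filter.mpr ⟨hTks y hy, by simp [pvDP, hdy, hpy]⟩
            have := hmf y this
            omega
          simp [hTnone, hp, hlt]
        · -- old minimum stays: it is in T and is T's first match
          have hflt : pvF m ≤ pvF x := by omega
          have hmLE : pvLE m x := Or.inr ⟨by rw [key1_dig hmd, key1_dig hd], by rw [key2_dig hmd, key2_dig hd]; exact hflt⟩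
          have hfindL : L.find? pvP = some m := by
            rw [ihf, pvMid, hmin]; simp
          have hmL : m ∈ L := List.mem_of_find?_eq_some hfindL
          have hmT : m ∈ T := by
            rcases (List.mem_append.mp (by rw [hTD]; exact hmL)) with h | h
            · exact h
            · exact absurd hmLE (drop_not_le x L ihp m h)
          have hTm : T.find? pvP = some m :=
            find?_of_mem_left (by rw [hTD]; exact hfindL) hmT
          simp [hTm, hlt]
    · -- non-digit match: x goes to the very end
      have hd' : pvDig x = false := by simpa using hd
      have hDrnil : Dr = [] := by
        rw [hDr, List.dropWhile_eq_nil_iff]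
        intro y _
        simp
        apply (pvLt_false_iff x y).mpr
        by_cases hdy : pvDig y = true
        · exact Or.inl (by rw [key1_nondig hd']; rw [key1_dig hdy]; omega)
        · have hdy' : pvDig y = false := by simpa using hdy
          exact Or.inr ⟨by rw [key1_nondig hdy', key1_nondig hd'], by rw [key2_nondig hdy', key2_nondig hd']⟩
      have hTL : T = L := by rw [← hTD, hDrnil, List.append_nil]
      have hmid : pvMid (ks ++ [x]) =
          (PySem.List.min? (ks.filter pvDP) pvF).or (((ks.filter pvNP).head?).or (some x)) := by
        simp [pvMid, List.filter_append, pvDP, pvNP, hd', hp, Option.or_assoc]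
      rw [hmid, hTL, hDrnil, if_pos hp, ihf, pvMid, Option.or_assoc]

-- ===== B-side characterization =====
def pvBV : Option String → Int
  | some m => pvF m
  | none => 0

lemma b_loop (ks : List String) :
    ks.foldl pvStepB (none, 0, none) =
      (PySem.List.min? (ks.filter pvDP) pvF,
       pvBV (PySem.List.min? (ks.filter pvDP) pvF),
       (ks.filter pvNP).head?) := by
  induction ks using List.reverseRecOn with
  | nil => simp [PySem.List.min?, pvBV]
  | append_singleton ks x ih =>
    rw [List.foldl_append, ih]
    simp only [List.foldl_cons, List.foldl_nil]
    by_cases hp : pvP x = true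
    · by_cases hd : pvDig x = true
      · have hfx : pvDP x = true := by simp [pvDP, hd, hp]
        have hnx : pvNP x = false := by simp [pvNP, hd]
        simp only [List.filter_append, List.filter_cons, List.filter_nil, hfx, hnx,
          if_true, if_false, List.append_nil, min?_append_singleton]
        cases hmin : PySem.List.min? (ks.filter pvDP) pvF with
        | none =>
          simp [pvStepB, pvP, pvDig, pvF, pvBV] at *
          simp [hp, hd]
        | some m =>
          simp [pvStepB, pvBV, pvP, pvDig, pvF] at *
          by_cases hlt : (PySem.Int.ofStr? x).getD 0 < (PySem.Int.ofStr? m).getD 0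
          · simp_all
          · simp [hp, hd, if_neg hlt]
      · have hd' : pvDig x = false := by simpa using hd
        have hfx : pvDP x = false := by simp [pvDP, hd']
        have hnx : pvNP x = true := by simp [pvNP, hd', hp]
        simp only [List.filter_append, List.filter_cons, List.filter_nil, hfx, hnx,
          if_true, if_false, List.append_nil, List.head?_append]
        cases hh : (ks.filter pvNP).head? with
        | none =>
          simp [pvStepB, pvP, pvDig] at *
          simp [hp, hd']
        | some z =>
          simp [pvStepB, pvP, pvDig] at *
          simp [hp, hd']
    · have hp' : pvP x = false := by simpa using hp
      have hfx : pvDP x = false := by simp [pvDP, hp']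
      have hnx : pvNP x = false := by simp [pvNP, hp']
      simp only [List.filter_append, List.filter_cons, List.filter_nil, hfx, hnx,
        if_false, List.append_nil]
      simp [pvStepB, pvP] at *
      simp [hp']

lemma alt_eq_mid (responses : List (String × String)) :
    first_success_status_py_alt responses = pvMid ((PySem.Dict.ofList responses).keys) := by
  unfold first_success_status_py_alt
  rw [b_loop]
  unfold pvMid
  cases PySem.List.min? (((PySem.Dict.ofList responses).keys).filter pvDP) pvF <;> simp

-- ===== VERDICT (by name: the statement is the Claim_ definition above) =====
theorem first_success_status_py_spec : Claim_equal_first_success_status_py := by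
  intro responses _
  unfold Spec_first_success_status_py
  rw [alt_eq_mid]
  unfold first_success_status_py
  have := (a_loop ((PySem.Dict.ofList responses).keys)).1
  rw [← this]
  rfl
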